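-- pv_equiv track=rewrite | github.com/0xFelipe/Desafio---CustomerSuccess-Balancing | Python/Resoluçao/customer_success_balancing.py | customer_success_balancing
-- ===== SOURCE A (Python) =====
-- def customer_success_balancing(customer_success, customers, customer_success_away):
--     css_disponiveis = [cs for cs in customer_success if cs["id"] not in customer_success_away] #Filtra os CS disponíveis
--
--     css_disponiveis.sort(key=lambda x: x["score"]) #Organizo os CS disponíveis por score
--     customers.sort(key=lambda x: x["score"]) #Organizo os clientes por score
--
--     clientes_por_cs = {cs["id"]: 0 for cs in css_disponiveis}  # Inicializo o dicionário de clientes por CS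
--     cs_index = 0
--     disp_cs = len(css_disponiveis) # Número de CS disponíveis
--
--     for cliente in customers:
--         while cs_index < disp_cs and css_disponiveis[cs_index]["score"] < cliente["score"]: # Verifico se o CS atual pode atender o cliente
--             # Se o CS atual não pode atender, passo para o próximo CS
--             # Isso garante que o CS com menor score possível que atenda o cliente seja escolhido
--             cs_index += 1
--
--         if cs_index < disp_cs:
--             cs_id = css_disponiveis[cs_index]["id"]
--             clientes_por_cs[cs_id] += 1
--     # Encontro o CS com mais clientes
--     mais_clientes = 0
--     vencedor_id = 0
--     empate = False
--
--     for cs_id, count in clientes_por_cs.items():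
--         if count > mais_clientes:
--             mais_clientes = count
--             vencedor_id = cs_id
--             empate = False
--         elif count == mais_clientes:
--             empate = True
--     return 0 if empate else vencedor_id  # Retorna 0 em caso de empate, ou o ID do CS vencedor
-- ===== SOURCE B (Python) =====
-- def customer_success_balancing(customer_success, customers, customer_success_away):
--     available = [cs for cs in customer_success if cs["id"] not in customer_success_away]
--     available.sort(key=lambda x: x["score"])
--     customers.sort(key=lambda x: x["score"])  # keep A's observable in-place sort of customers
--     tally = {cs["id"]: 0 for cs in available}
--     for cliente in customers:
--         s = cliente["score"]
--         cs = next((c for c in available if s <= c["score"]), None)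
--         if cs is not None:
--             tally[cs["id"]] += 1
--     if not tally:
--         return 0
--     top = max(tally.values())
--     if top <= 0:
--         return 0
--     winners = [cs_id for cs_id, count in tally.items() if count == top]
--     return winners[0] if len(winners) == 1 else 0
-- ===== Notes on version B (the rewrite author's own statement) =====
-- stated objective: alternative
-- what changed: A walks the score-sorted CS list with a resumable two-pointer index shared across the sorted customers and picks the winner with a running-max/tie-flag loop; B instead finds each customer's first capable CS by an independent scan and extracts the winner by max over the tallies plus a filter for ties.
import Mathlib
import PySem

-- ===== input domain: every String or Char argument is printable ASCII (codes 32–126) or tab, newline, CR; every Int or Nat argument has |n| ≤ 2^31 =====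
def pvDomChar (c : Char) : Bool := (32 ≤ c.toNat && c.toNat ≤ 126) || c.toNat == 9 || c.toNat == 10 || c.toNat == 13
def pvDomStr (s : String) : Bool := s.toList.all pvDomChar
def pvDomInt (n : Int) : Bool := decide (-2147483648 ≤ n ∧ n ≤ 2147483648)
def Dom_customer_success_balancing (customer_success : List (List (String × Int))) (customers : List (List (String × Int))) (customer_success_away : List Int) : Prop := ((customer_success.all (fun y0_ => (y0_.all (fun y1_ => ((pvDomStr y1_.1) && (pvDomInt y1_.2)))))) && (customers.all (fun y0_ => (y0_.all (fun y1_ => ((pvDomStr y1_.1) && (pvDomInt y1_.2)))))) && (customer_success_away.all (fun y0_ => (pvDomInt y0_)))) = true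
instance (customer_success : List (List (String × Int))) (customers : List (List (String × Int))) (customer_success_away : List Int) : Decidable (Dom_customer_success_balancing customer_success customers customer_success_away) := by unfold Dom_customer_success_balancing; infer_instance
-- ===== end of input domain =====

-- B replaces A's resumable two-pointer walk by an independent first-capable scan per customer and
-- extracts the winner by max/filter instead of A's running-max flag loop (objective: alternative,
-- same results).  Both Pythons sort `customers` in place exactly as A does; the theorems below are
-- about the RETURN value.

-- ===== PORT A =====
-- cs["k"] on the dict a cs/customer association list denotes (first binding wins); default 0 is
-- never reached under Pre_ (Python raises KeyError there).
def pvDget (d : List (String × Int)) (k : String) : Int :=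
  (((d.find? (fun p => p.1 == k)).map Prod.snd).getD 0)

-- the available-CS list, filtered then sorted by score (identical lines in A and B)
def csbAvail (customer_success : List (List (String × Int))) (customer_success_away : List Int) : List (List (String × Int)) :=
  PySem.List.sorted (customer_success.filter (fun cs => !(customer_success_away.contains (pvDget cs "id")))) (fun cs => pvDget cs "score")

-- {cs["id"]: 0 for cs in css}  (identical line in A and B)
def csbInit (css : List (List (String × Int))) : PySem.Dict Int Int :=
  css.foldl (fun d cs => d.insert (pvDget cs "id") 0) PySem.Dict.empty

-- A's while-loop advancing cs_index
def csbAdvance (css : List (List (String × Int))) (s : Int) (i : Nat) : Nat :=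
  if h : i < css.length then
    if pvDget css[i] "score" < s then csbAdvance css s (i + 1) else i
  else i
termination_by css.length - i

-- the body of A's for-loop over customers
def csbStepA (css : List (List (String × Int))) (st : PySem.Dict Int Int × Nat) (cliente : List (String × Int)) : PySem.Dict Int Int × Nat :=
  let i := csbAdvance css (pvDget cliente "score") st.2
  if h : i < css.length then (st.1.modify (pvDget css[i] "id") 0 (· + 1), i) else (st.1, i)

-- the body of A's winner loop (mais_clientes, vencedor_id, empate)
def csbW (acc : Int × Int × Bool) (p : Int × Int) : Int × Int × Bool :=
  if acc.1 < p.2 then (p.2, p.1, false)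
  else if p.2 == acc.1 then (acc.1, acc.2.1, true) else acc

def customer_success_balancing (customer_success : List (List (String × Int))) (customers : List (List (String × Int))) (customer_success_away : List Int) : Int :=
  let css := csbAvail customer_success customer_success_away
  let cls := PySem.List.sorted customers (fun c => pvDget c "score")
  let tally := (cls.foldl (csbStepA css) (csbInit css, 0)).1
  let fin := tally.items.foldl csbW (0, 0, false)
  if fin.2.2 then 0 else fin.2.1

-- ===== PORT B =====
-- the body of B's for-loop: first capable CS by a fresh scan
def csbStepB (css : List (List (String × Int))) (d : PySem.Dict Int Int) (cliente : List (String × Int)) : PySem.Dict Int Int :=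
  match css.find? (fun c => decide (pvDget cliente "score" ≤ pvDget c "score")) with
  | some cs => d.modify (pvDget cs "id") 0 (· + 1)
  | none => d

def customer_success_balancing_alt (customer_success : List (List (String × Int))) (customers : List (List (String × Int))) (customer_success_away : List Int) : Int :=
  let css := csbAvail customer_success customer_success_away
  let cls := PySem.List.sorted customers (fun c => pvDget c "score")
  let tally := cls.foldl (csbStepB css) (csbInit css)
  if tally.items.isEmpty then 0
  else
    let top := (PySem.List.max? (tally.items.map Prod.snd) (fun v => v)).getD 0
    if top ≤ 0 then 0
    else
      let winners := (tally.items.filter (fun p => p.2 == top)).map Prod.fst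
      if winners.length == 1 then winners.headD 0 else 0

-- ===== PRECONDITION & SPEC =====
def pvHasKey (d : List (String × Int)) (k : String) : Bool := d.any (fun p => p.1 == k)

-- Pre_ excludes exactly the inputs on which the Python raises KeyError: a CS record without an
-- "id" key, an available (not-away) CS record without a "score" key, or a customer record
-- without a "score" key.
def Pre_customer_success_balancing (customer_success : List (List (String × Int))) (customers : List (List (String × Int))) (customer_success_away : List Int) : Prop :=
  (∀ cs ∈ customer_success, pvHasKey cs "id" = true ∧
      (customer_success_away.contains (pvDget cs "id") = false → pvHasKey cs "score" = true)) ∧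
  (∀ c ∈ customers, pvHasKey c "score" = true)
instance (customer_success : List (List (String × Int))) (customers : List (List (String × Int))) (customer_success_away : List Int) : Decidable (Pre_customer_success_balancing customer_success customers customer_success_away) := by unfold Pre_customer_success_balancing; infer_instance

def pvWitness_customer_success_balancing : (List (List (String × Int))) × (List (List (String × Int))) × List Int :=
  ([[("id", 1), ("score", 50)], [("id", 2), ("score", 20)]], [[("score", 30)], [("score", 10)]], [2])

def Spec_customer_success_balancing (customer_success : List (List (String × Int))) (customers : List (List (String × Int))) (customer_success_away : List Int) (out : Int) : Prop := out = customer_success_balancing_alt customer_success customers customer_success_away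
instance (customer_success : List (List (String × Int))) (customers : List (List (String × Int))) (customer_success_away : List Int) (out : Int) : Decidable (Spec_customer_success_balancing customer_success customers customer_success_away out) := by unfold Spec_customer_success_balancing; infer_instance

-- ===== CLAIM (what is proved, stated in full; the proofs are below) =====
def Claim_equal_customer_success_balancing : Prop := ∀ (customer_success : List (List (String × Int))) (customers : List (List (String × Int))) (customer_success_away : List Int), Dom_customer_success_balancing customer_success customers customer_success_away → Pre_customer_success_balancing customer_success customers customer_success_away → Spec_customer_success_balancing customer_success customers customer_success_away (customer_success_balancing customer_success customers customer_success_away)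

-- ===== LEMMAS AND PROOFS =====

lemma csb_find?_eq_findIdx {α : Type} (l : List α) (p : α → Bool) :
    l.find? p = if h : l.findIdx p < l.length then some (l[l.findIdx p]) else none := by
  induction l with
  | nil => simp
  | cons x t ih =>
    by_cases hx : p x
    · simp [List.find?_cons_of_pos hx, List.findIdx_cons, hx]
    · simp only [List.find?_cons_of_neg (by simpa using hx), List.findIdx_cons, hx, cond_false, ih]
      by_cases h : t.findIdx p < t.length
      · rw [dif_pos h, dif_pos (by simpa using Nat.succ_lt_succ h)]
        simp
      · rw [dif_neg h, dif_neg (by simpa using h)]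

lemma csb_adv_eq (css : List (List (String × Int))) (s : Int) :
    ∀ i, i ≤ css.length →
      (∀ j, j < i → (h2 : j < css.length) → pvDget css[j] "score" < s) →
      csbAdvance css s i = css.findIdx (fun cs => decide (s ≤ pvDget cs "score")) := by
  intro i
  induction hn : css.length - i generalizing i with
  | zero =>
    intro hle hbelow
    have hi : i = css.length := by omega
    rw [csbAdvance, dif_neg (by omega)]
    subst hi
    symm
    rw [List.findIdx_eq_length]
    intro x hx
    obtain ⟨j, hj, rfl⟩ := List.mem_iff_getElem.mp hx
    have := hbelow j (by omega) hj
    simpa using by omega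
  | succ n ih =>
    intro hle hbelow
    have hi : i < css.length := by omega
    rw [csbAdvance, dif_pos hi]
    by_cases hlt : pvDget css[i] "score" < s
    · rw [if_pos hlt]
      refine ih (i + 1) (by omega) (by omega) ?_
      intro j hj h2
      rcases Nat.lt_succ_iff_lt_or_eq.mp hj with h | h
      · exact hbelow j h h2
      · subst h; exact hlt
    · rw [if_neg hlt]
      symm
      rw [List.findIdx_eq (by omega)]
      constructor
      · simpa using by omega
      · intro j hj
        have := hbelow j hj (by omega)
        simpa using by omega

lemma csb_loop_eq (css : List (List (String × Int))) :
    ∀ (cls : List (List (String × Int))),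
      cls.Pairwise (fun a b => pvDget a "score" ≤ pvDget b "score") →
      ∀ (d : PySem.Dict Int Int) (i : Nat), i ≤ css.length →
        (∀ c ∈ cls, ∀ j, j < i → (h2 : j < css.length) → pvDget css[j] "score" < pvDget c "score") →
        (cls.foldl (csbStepA css) (d, i)).1 = cls.foldl (csbStepB css) d := by
  intro cls
  induction cls with
  | nil => intro _ d i _ _; rfl
  | cons c t ih =>
    intro hp d i hle hbelow
    obtain ⟨hrel, hpt⟩ := List.pairwise_cons.mp hp
    have hadv : csbAdvance css (pvDget c "score") i
        = css.findIdx (fun cs => decide (pvDget c "score" ≤ pvDget cs "score")) :=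
      csb_adv_eq css (pvDget c "score") i hle
        (fun j h1 h2 => hbelow c (List.mem_cons_self) j h1 h2)
    set i' := css.findIdx (fun cs => decide (pvDget c "score" ≤ pvDget cs "score")) with hi'
    have hfind := csb_find?_eq_findIdx css (fun cs => decide (pvDget c "score" ≤ pvDget cs "score"))
    have hstep : csbStepA css (d, i) c = (csbStepB css d c, i') := by
      unfold csbStepA csbStepB
      simp only [hadv]
      by_cases h : i' < css.length
      · rw [dif_pos h]
        rw [hfind, dif_pos h]
      · rw [dif_neg h]
        rw [hfind, dif_neg h]
    simp only [List.foldl_cons, hstep]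
    apply ih hpt _ i' (List.findIdx_le_length)
    intro c' hc' j hj h2
    have hnp : ¬ (pvDget c "score" ≤ pvDget css[j] "score") := by
      have := List.not_of_lt_findIdx (xs := css)
        (p := fun cs => decide (pvDget c "score" ≤ pvDget cs "score")) (i := j) (by omega)
      simpa using this
    have h1 : pvDget css[j] "score" < pvDget c "score" := by omega
    exact lt_of_lt_of_le h1 (hrel c' hc')

lemma csb_W_all_le (l : List (Int × Int)) :
    ∀ (m v : Int) (e : Bool), (∀ p ∈ l, p.2 ≤ m) →
      l.foldl csbW (m, v, e) = (m, v, e || l.any (fun p => p.2 == m)) := by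
  induction l with
  | nil => intro m v e _; simp
  | cons q t ih =>
    intro m v e h
    have hq : q.2 ≤ m := h q (List.mem_cons_self)
    have hnot : ¬ (m < q.2) := by omega
    simp only [List.foldl_cons, csbW, if_neg hnot]
    by_cases heq : q.2 = m
    · rw [if_pos (by simpa using heq)]
      rw [ih m v true (fun p hp => h p (List.mem_cons_of_mem _ hp))]
      simp [heq]
    · rw [if_neg (by simpa using heq)]
      rw [ih m v e (fun p hp => h p (List.mem_cons_of_mem _ hp))]
      simp [show (q.2 == m) = false by simpa using heq]

lemma csb_W_gt (l : List (Int × Int)) :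
    ∀ (m v : Int) (e : Bool), (∃ p ∈ l, m < p.2) →
      l.foldl csbW (m, v, e) =
        ((l.map Prod.snd).foldl max m,
         ((l.find? (fun p => p.2 == (l.map Prod.snd).foldl max m)).map Prod.fst).getD 0,
         decide (2 ≤ l.countP (fun p => p.2 == (l.map Prod.snd).foldl max m))) := by
  induction l with
  | nil => intro m v e h; simp at h
  | cons q t ih =>
    intro m v e h
    simp only [List.map_cons, List.foldl_cons, List.countP_cons]
    by_cases hq : m < q.2
    · rw [show max m q.2 = q.2 by omega]
      simp only [csbW, if_pos hq]
      by_cases hgt : ∃ p ∈ t, q.2 < p.2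
      · -- the tail still beats q.2
        have hMgt : q.2 < (t.map Prod.snd).foldl max q.2 := by
          obtain ⟨p, hp, hlt⟩ := hgt
          have := (PySem.List.le_foldl_max (t.map Prod.snd) q.2).2 p.2 (List.mem_map_of_mem hp)
          omega
        rw [ih q.2 q.1 false hgt]
        rw [List.find?_cons_of_neg (by simp; omega)]
        simp only [show (q.2 == (t.map Prod.snd).foldl max q.2) = false by simp; omega]
        simp
      · push Not at hgt
        have hall : ∀ p ∈ t, p.2 ≤ q.2 := fun p hp => hgt p hp
        have hM : (t.map Prod.snd).foldl max q.2 = q.2 := by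
          rcases PySem.List.foldl_max_mem (t.map Prod.snd) q.2 with h' | h'
          · exact h'
          · obtain ⟨p, hp, hv⟩ := List.mem_map.mp h'
            have := hall p hp
            have := (PySem.List.le_foldl_max (t.map Prod.snd) q.2).1
            omega
        rw [hM]
        rw [csb_W_all_le t q.2 q.1 false hall]
        rw [List.find?_cons_of_pos (by simp)]
        have hcnt : (if (q.2 == q.2) = true then 1 else 0) = 1 := by simp
        simp only [Option.map_some, Option.getD_some, Prod.mk.injEq, hcnt, Bool.false_or]
        refine ⟨trivial, trivial, ?_⟩
        -- tie flag: any (== q.2) in t  ↔  2 ≤ 1 + count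
        by_cases ha : ∃ p ∈ t, p.2 = q.2
        · have h1 : (t.any fun p => p.2 == q.2) = true := by
            simp only [List.any_eq_true]; simpa using ha
          have h2 : 0 < t.countP (fun p => p.2 == q.2) := by
            rw [List.countP_pos_iff]; simpa using ha
          rw [h1]
          exact (decide_eq_true (by omega : 2 ≤ t.countP (fun p => p.2 == q.2) + 1)).symm
        · have h1 : (t.any fun p => p.2 == q.2) = false := by
            simp only [List.any_eq_false]; intro p hp; simpa using fun hh => ha ⟨p, hp, hh⟩
          have h2 : t.countP (fun p => p.2 == q.2) = 0 := by
            rw [List.countP_eq_zero]; intro p hp; simpa using fun hh => ha ⟨p, hp, hh⟩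
          rw [h1, h2]; simp
    · -- head does not beat m
      have hq2 : q.2 ≤ m := by omega
      have hgt : ∃ p ∈ t, m < p.2 := by
        obtain ⟨p, hp, hlt⟩ := h
        rcases List.mem_cons.mp hp with rfl | hp'
        · omega
        · exact ⟨p, hp', hlt⟩
      rw [show max m q.2 = m by omega]
      have hMgt : m < (t.map Prod.snd).foldl max m := by
        obtain ⟨p, hp, hlt⟩ := hgt
        have := (PySem.List.le_foldl_max (t.map Prod.snd) m).2 p.2 (List.mem_map_of_mem hp)
        omega
      have hhead : (q.2 == (t.map Prod.snd).foldl max m) = false := by simp; omega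
      rw [List.find?_cons_of_neg (by simpa using hhead)]
      simp only [hhead]
      simp only [csbW, if_neg hq]
      by_cases heq : q.2 = m
      · rw [if_pos (by simpa using heq)]
        rw [ih m v true hgt]
        simp
      · rw [if_neg (by simpa using heq)]
        rw [ih m v e hgt]
        simp

lemma csb_headD_filter (xs : List (Int × Int)) (pr : Int × Int → Bool) :
    ((xs.filter pr).map Prod.fst).headD 0 = ((xs.find? pr).map Prod.fst).getD 0 := by
  rw [← List.head?_filter]
  cases xs.filter pr <;> simp

lemma csb_winner_eq (l : List (Int × Int)) :
    (if (l.foldl csbW (0, 0, false)).2.2 then 0 else (l.foldl csbW (0, 0, false)).2.1) =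
    (if l.isEmpty then 0
     else
       if (PySem.List.max? (l.map Prod.snd) (fun v => v)).getD 0 ≤ 0 then 0
       else
         if ((l.filter (fun p => p.2 == (PySem.List.max? (l.map Prod.snd) (fun v => v)).getD 0)).map Prod.fst).length == 1
         then ((l.filter (fun p => p.2 == (PySem.List.max? (l.map Prod.snd) (fun v => v)).getD 0)).map Prod.fst).headD 0
         else 0) := by
  cases l with
  | nil => simp
  | cons q t =>
    have hmax : (PySem.List.max? ((q :: t).map Prod.snd) (fun v => v)).getD 0
        = (t.map Prod.snd).foldl max q.2 := by
      rw [List.map_cons, PySem.List.max?_id_cons]; rfl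
    set top := (t.map Prod.snd).foldl max q.2 with htop
    have htople : q.2 ≤ top := (PySem.List.le_foldl_max (t.map Prod.snd) q.2).1
    have htopmem : ∃ p ∈ q :: t, p.2 = top := by
      rcases PySem.List.foldl_max_mem (t.map Prod.snd) q.2 with h' | h'
      · exact ⟨q, List.mem_cons_self, h'.symm⟩
      · obtain ⟨p, hp, hv⟩ := List.mem_map.mp h'
        exact ⟨p, List.mem_cons_of_mem _ hp, hv⟩
    rw [hmax]
    rw [if_neg (by simp : ¬ ((q :: t).isEmpty = true))]
    by_cases hpos : (0 : Int) < top
    · rw [if_neg (by omega : ¬ top ≤ 0)]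
      have hgt : ∃ p ∈ q :: t, (0 : Int) < p.2 := by
        obtain ⟨p, hp, hv⟩ := htopmem
        exact ⟨p, hp, by omega⟩
      have hM : ((q :: t).map Prod.snd).foldl max 0 = top := by
        rw [List.map_cons, List.foldl_cons, List.foldl_assoc]
        exact max_eq_right hpos.le
      rw [csb_W_gt (q :: t) 0 0 false hgt, hM]
      change (if decide (2 ≤ (q :: t).countP (fun p => p.2 == top)) = true then (0 : Int)
              else ((List.find? (fun p => p.2 == top) (q :: t)).map Prod.fst).getD 0) = _
      have hlen : ((q :: t).filter (fun p => p.2 == top)).length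
          = (q :: t).countP (fun p => p.2 == top) := List.countP_eq_length_filter.symm
      have hcnt1 : 0 < (q :: t).countP (fun p => p.2 == top) := by
        rw [List.countP_pos_iff]
        obtain ⟨p, hp, hv⟩ := htopmem
        exact ⟨p, hp, by simpa using hv⟩
      by_cases h2 : 2 ≤ (q :: t).countP (fun p => p.2 == top)
      · rw [if_pos (by simpa using h2)]
        rw [if_neg (by simp only [List.length_map, hlen, beq_iff_eq]; omega)]
      · rw [if_neg (by simpa using h2)]
        rw [if_pos (by simp only [List.length_map, hlen, beq_iff_eq]; omega)]
        exact (csb_headD_filter (q :: t) (fun p => p.2 == top)).symm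
    · rw [if_pos (by omega : top ≤ 0)]
      have hall : ∀ p ∈ q :: t, p.2 ≤ 0 := by
        intro p hp
        rcases List.mem_cons.mp hp with rfl | hp'
        · omega
        · have := (PySem.List.le_foldl_max (t.map Prod.snd) q.2).2 p.2 (List.mem_map_of_mem hp')
          omega
      rw [csb_W_all_le (q :: t) 0 0 false hall]
      change (if (false || (q :: t).any fun p => p.2 == (0:Int)) = true then (0:Int) else 0) = 0
      simp

-- ===== VERDICT (by name: the statement is the Claim_ definition above) =====
theorem customer_success_balancing_spec : Claim_equal_customer_success_balancing := by
  intro customer_success customers customer_success_away _hdom _hpre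
  unfold Spec_customer_success_balancing
  unfold customer_success_balancing customer_success_balancing_alt
  simp only []
  have hloop := csb_loop_eq (csbAvail customer_success customer_success_away)
      (PySem.List.sorted customers (fun c => pvDget c "score"))
      (PySem.List.sorted_pairwise customers (fun c => pvDget c "score"))
      (csbInit (csbAvail customer_success customer_success_away)) 0 (Nat.zero_le _)
      (by intro c _ j hj _; omega)
  rw [hloop]
  exact csb_winner_eq _
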